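-- pv_equiv track=rewrite | github.com/M4rce129/Encriptador | Codificador_V2.8.py | LOG_IN
-- ===== SOURCE A (Python) =====
-- def LOG_IN(nombre, lista):
--     nombre = nombre.upper()
--     for i, item in enumerate(lista):
--         descifrado = ""
--         for c in item:
--             if c.isupper():
--                 descifrado += chr((ord(c) - ord('A') - 19) % 26 + ord('A'))
--             elif c.islower():
--                 descifrado += chr((ord(c) - ord('a') - 19) % 26 + ord('a'))
--             else:
--                 descifrado += c
--         if descifrado.upper() == nombre:
--             return i  # * Usuario encontrado
--     return None  # ! Usuario no encontrado
-- ===== SOURCE B (Python) =====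
-- def LOG_IN(nombre, lista):
--     # Encrypt the uppercased target once (Caesar +19 on A-Z); then a plain scan
--     # comparing each item uppercased -- no per-item decryption loop.
--     objetivo = "".join(
--         chr((ord(c) - ord('A') + 19) % 26 + ord('A')) if 'A' <= c <= 'Z' else c
--         for c in nombre.upper()
--     )
--     for i, item in enumerate(lista):
--         if item.upper() == objetivo:
--             return i
--     return None
-- ===== Notes on version B (the rewrite author's own statement) =====
-- stated objective: faster
-- what changed: Instead of decrypting every list item character by character and comparing to nombre.upper(), B encrypts the uppercased target once (Caesar +19 on A-Z, the inverse of A's -19 decryption) and scans the list comparing each item uppercased, eliminating the per-item decryption loop.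
import Mathlib
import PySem

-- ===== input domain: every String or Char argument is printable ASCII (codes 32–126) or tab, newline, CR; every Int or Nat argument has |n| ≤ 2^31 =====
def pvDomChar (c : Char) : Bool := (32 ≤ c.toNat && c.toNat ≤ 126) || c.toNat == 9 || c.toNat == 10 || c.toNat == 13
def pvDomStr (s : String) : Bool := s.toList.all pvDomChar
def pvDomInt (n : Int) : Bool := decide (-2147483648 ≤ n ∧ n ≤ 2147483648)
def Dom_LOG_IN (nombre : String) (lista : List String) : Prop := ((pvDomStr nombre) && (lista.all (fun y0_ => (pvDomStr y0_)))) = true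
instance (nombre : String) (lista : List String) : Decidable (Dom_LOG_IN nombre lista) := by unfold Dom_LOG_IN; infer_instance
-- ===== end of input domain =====

-- B replaces A's per-item character-by-character decryption with a single up-front
-- encryption of the target (Caesar +19) followed by a plain uppercase-compare scan.

-- ===== PORT A =====
-- one character of A's inner decryption loop (the three branches, in order)
def pvDecCharA (c : Char) : Char :=
  if PySem.Chars.isupper c then
    Char.ofNat (((((c.toNat : Int) - ('A'.toNat : Int) - 19).emod 26).toNat + 'A'.toNat))
  else if PySem.Chars.islower c then
    Char.ofNat (((((c.toNat : Int) - ('a'.toNat : Int) - 19).emod 26).toNat + 'a'.toNat))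
  else c

-- A's enumerate loop: build descifrado by appending, compare, early return
def pvGoA (nombreU : List Char) : List (List Char) → Int → Option Int
  | [], _ => none
  | item :: rest, i =>
      let descifrado := item.foldl (fun acc c => acc ++ [pvDecCharA c]) []
      if PySem.Chars.upper descifrado = nombreU then some i
      else pvGoA nombreU rest (i + 1)

def LOG_IN (nombre : String) (lista : List String) : Option Int :=
  pvGoA (PySem.Chars.upper nombre.toList) (lista.map String.toList) 0

-- ===== PORT B =====
-- B's encryption of one uppercased character of the target (Caesar +19 on A-Z)
def pvEncCharB (c : Char) : Char :=
  if 'A' ≤ c ∧ c ≤ 'Z' then Char.ofNat ((c.toNat - 'A'.toNat + 19) % 26 + 'A'.toNat)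
  else c

-- B's scan: compare each item uppercased against the precomputed target
def pvGoB (objetivo : List Char) : List (List Char) → Int → Option Int
  | [], _ => none
  | item :: rest, i =>
      if PySem.Chars.upper item = objetivo then some i
      else pvGoB objetivo rest (i + 1)

def LOG_IN_alt (nombre : String) (lista : List String) : Option Int :=
  let objetivo := (PySem.Chars.upper nombre.toList).map pvEncCharB
  pvGoB objetivo (lista.map String.toList) 0

-- ===== PRECONDITION & SPEC =====
def Spec_LOG_IN (nombre : String) (lista : List String) (out : Option Int) : Prop := out = LOG_IN_alt nombre lista
instance (nombre : String) (lista : List String) (out : Option Int) : Decidable (Spec_LOG_IN nombre lista out) := by unfold Spec_LOG_IN; infer_instance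

-- ===== CLAIM (what is proved, stated in full; the proofs are below) =====
def Claim_equal_LOG_IN : Prop := ∀ (nombre : String) (lista : List String), Dom_LOG_IN nombre lista → Spec_LOG_IN nombre lista (LOG_IN nombre lista)

-- ===== LEMMAS AND PROOFS =====

-- decryption of an already-uppercased character (how A's "descifrado.upper()" acts per character)
def pvDecU (c : Char) : Char :=
  if PySem.Chars.isupper c then
    Char.ofNat (((((c.toNat : Int) - ('A'.toNat : Int) - 19).emod 26).toNat + 'A'.toNat))
  else c

-- the foldl-append in A's inner loop is a map
theorem foldl_append_map (f : Char → Char) (xs acc : List Char) :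
    xs.foldl (fun a c => a ++ [f c]) acc = acc ++ xs.map f := by
  induction xs generalizing acc with
  | nil => simp
  | cons x xs ih => simp [List.foldl, ih]

-- char-level facts, verified by decide over the 128 ASCII codes
theorem ascii_check :
    ((List.range 128).all fun n =>
      let c := Char.ofNat n
      pvDomChar c →
        (PySem.Chars.upperChar (pvDecCharA c) = pvDecU (PySem.Chars.upperChar c)
         ∧ pvEncCharB (pvDecU (PySem.Chars.upperChar c)) = PySem.Chars.upperChar c
         ∧ pvDecU (pvEncCharB (PySem.Chars.upperChar c)) = PySem.Chars.upperChar c)) = true := by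
  decide

theorem ascii_fact (c : Char) (h : pvDomChar c = true) :
    PySem.Chars.upperChar (pvDecCharA c) = pvDecU (PySem.Chars.upperChar c)
    ∧ pvEncCharB (pvDecU (PySem.Chars.upperChar c)) = PySem.Chars.upperChar c
    ∧ pvDecU (pvEncCharB (PySem.Chars.upperChar c)) = PySem.Chars.upperChar c := by
  have hlt : c.toNat < 128 := by
    simp only [pvDomChar, Bool.or_eq_true, Bool.and_eq_true, decide_eq_true_eq, beq_iff_eq] at h
    omega
  have := List.all_eq_true.mp ascii_check c.toNat (List.mem_range.mpr hlt)
  simpa [Char.ofNat_toNat, h] using this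

-- per item: A's comparison equals B's comparison
theorem item_iff (ns item : List Char)
    (hn : ∀ c ∈ ns, pvDomChar c = true) (hi : ∀ c ∈ item, pvDomChar c = true) :
    (PySem.Chars.upper (item.foldl (fun a c => a ++ [pvDecCharA c]) []) = PySem.Chars.upper ns)
      ↔ (PySem.Chars.upper item = (PySem.Chars.upper ns).map pvEncCharB) := by
  rw [foldl_append_map]
  simp only [List.nil_append, PySem.Chars.upper, List.map_map]
  constructor
  · intro h
    have h2 := congrArg (List.map pvEncCharB) h
    simp only [List.map_map] at h2
    calc item.map PySem.Chars.upperChar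
        = item.map (pvEncCharB ∘ PySem.Chars.upperChar ∘ pvDecCharA) := by
          refine List.map_congr_left (fun c hc => ?_)
          have t := ascii_fact c (hi c hc)
          simp only [Function.comp_apply, t.1, t.2.1]
      _ = ns.map (pvEncCharB ∘ PySem.Chars.upperChar) := h2
  · intro h
    have h2 := congrArg (List.map pvDecU) h
    simp only [List.map_map] at h2
    calc item.map (PySem.Chars.upperChar ∘ pvDecCharA)
        = item.map (pvDecU ∘ PySem.Chars.upperChar) := by
          refine List.map_congr_left (fun c hc => ?_)
          exact (ascii_fact c (hi c hc)).1
      _ = ns.map (pvDecU ∘ pvEncCharB ∘ PySem.Chars.upperChar) := h2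
      _ = ns.map PySem.Chars.upperChar := by
          refine List.map_congr_left (fun c hc => ?_)
          exact (ascii_fact c (hn c hc)).2.2

-- the two scans agree step by step
theorem go_eq (ns : List Char) (l : List (List Char)) (i : Int)
    (hn : ∀ c ∈ ns, pvDomChar c = true)
    (hl : ∀ item ∈ l, ∀ c ∈ item, pvDomChar c = true) :
    pvGoA (PySem.Chars.upper ns) l i
      = pvGoB ((PySem.Chars.upper ns).map pvEncCharB) l i := by
  induction l generalizing i with
  | nil => rfl
  | cons item rest ih =>
      have hi : ∀ c ∈ item, pvDomChar c = true := hl item (List.mem_cons_self ..)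
      have hrest : ∀ it ∈ rest, ∀ c ∈ it, pvDomChar c = true :=
        fun it hit => hl it (List.mem_cons_of_mem _ hit)
      simp only [pvGoA, pvGoB]
      by_cases h : PySem.Chars.upper (item.foldl (fun a c => a ++ [pvDecCharA c]) []) = PySem.Chars.upper ns
      · rw [if_pos h, if_pos ((item_iff ns item hn hi).mp h)]
      · rw [if_neg h, if_neg (fun hb => h ((item_iff ns item hn hi).mpr hb)), ih _ hrest]

-- ===== VERDICT (by name: the statement is the Claim_ definition above) =====
theorem LOG_IN_spec : Claim_equal_LOG_IN := by
  intro nombre lista hdom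
  unfold Dom_LOG_IN at hdom
  simp only [Bool.and_eq_true, List.all_eq_true, pvDomStr] at hdom
  unfold Spec_LOG_IN LOG_IN LOG_IN_alt
  refine go_eq nombre.toList (lista.map String.toList) 0 hdom.1 ?_
  intro item hitem c hc
  rcases List.mem_map.mp hitem with ⟨s, hs, rfl⟩
  exact hdom.2 s hs c hc
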